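-- pv_equiv track=rewrite | github.com/VaibhavKalyan/CGS-410 | data_loader.py | map_word_to_token
-- ===== SOURCE A (Python) =====
-- def map_word_to_token(char_start, offset_mapping):
--     """
--     Map a word's character start position to its first subword token index.
--     Stanza returns word-level indices; GPT-2 uses subword tokens — this bridges
--     the gap so syntax-match checks look at the correct token positions.
--     """
--     if char_start is None or not offset_mapping:
--         return None
--     for tok_idx, (tok_start, tok_end) in enumerate(offset_mapping):
--         if tok_start <= char_start < tok_end:
--             return tok_idx
--     # Fallback: nearest token start
--     return min(range(len(offset_mapping)),
--                key=lambda i: abs(offset_mapping[i][0] - char_start))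
-- ===== SOURCE B (Python) =====
-- def map_word_to_token(char_start, offset_mapping):
--     """Single-pass variant: containment check and nearest-start tracking fused
--     into one loop over enumerate(offset_mapping)."""
--     if char_start is None or not offset_mapping:
--         return None
--     best_idx = 0
--     best_dist = abs(offset_mapping[0][0] - char_start)
--     for i, (s, e) in enumerate(offset_mapping):
--         if s <= char_start < e:
--             return i
--         d = abs(s - char_start)
--         if d < best_dist:
--             best_idx, best_dist = i, d
--     return best_idx
-- ===== Notes on version B (the rewrite author's own statement) =====
-- stated objective: alternative
-- what changed: A scans once for containment and then runs min() over range(len(...)) with repeated indexing as a second full pass; B fuses both into one loop over enumerate that tracks best_idx/best_dist with a strict-less update (so the first minimal index wins, as with min()), eliminating the second pass and the index-based lookups.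
import Mathlib
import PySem

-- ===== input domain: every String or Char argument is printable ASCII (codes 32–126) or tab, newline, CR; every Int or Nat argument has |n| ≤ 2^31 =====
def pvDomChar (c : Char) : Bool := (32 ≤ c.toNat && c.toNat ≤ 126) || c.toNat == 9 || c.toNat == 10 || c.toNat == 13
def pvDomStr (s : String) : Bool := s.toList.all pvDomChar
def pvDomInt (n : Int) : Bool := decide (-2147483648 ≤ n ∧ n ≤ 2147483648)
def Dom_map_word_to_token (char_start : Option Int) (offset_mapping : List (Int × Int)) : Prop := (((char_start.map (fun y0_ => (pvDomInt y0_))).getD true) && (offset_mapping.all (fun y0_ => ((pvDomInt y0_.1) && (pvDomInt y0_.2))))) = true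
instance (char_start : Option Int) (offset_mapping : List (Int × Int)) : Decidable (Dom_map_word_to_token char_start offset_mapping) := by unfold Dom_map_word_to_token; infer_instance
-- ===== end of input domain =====

-- B fuses A's containment scan and its separate min()-over-indices fallback pass into one single loop over enumerate; the return value is identical.


-- ===== PORT A =====
-- the 'for tok_idx, (tok_start, tok_end) in enumerate(...)' loop of A
def findTokA (c : Int) : List (Int × (Int × Int)) → Option Int
  | [] => none
  | (i, (s, e)) :: rest => if s ≤ c ∧ c < e then some i else findTokA c rest

def map_word_to_token (char_start : Option Int) (offset_mapping : List (Int × Int)) : Option Int :=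
  match char_start with
  | none => none
  | some c =>
    if offset_mapping.isEmpty then none
    else
      match findTokA c (PySem.List.enumerate offset_mapping 0) with
      | some i => some i
      | none =>
        -- min(range(len(offset_mapping)), key=lambda i: abs(offset_mapping[i][0] - char_start))
        PySem.List.min? (PySem.List.pyRange 0 (offset_mapping.length : Int) 1)
          (fun i => |(PySem.List.pyGetD offset_mapping i ((0 : Int), (0 : Int))).1 - c|)

-- ===== PORT B =====
-- B's single fused loop over enumerate(offset_mapping)
def altLoop (c : Int) (bestIdx bestDist : Int) : List (Int × (Int × Int)) → Int
  | [] => bestIdx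
  | (i, (s, e)) :: rest =>
    if s ≤ c ∧ c < e then i
    else
      let d := |s - c|
      if d < bestDist then altLoop c i d rest
      else altLoop c bestIdx bestDist rest

def map_word_to_token_alt (char_start : Option Int) (offset_mapping : List (Int × Int)) : Option Int :=
  match char_start with
  | none => none
  | some c =>
    match offset_mapping with
    | [] => none
    | (s0, _) :: _ =>
      some (altLoop c 0 (|s0 - c|) (PySem.List.enumerate offset_mapping 0))

-- ===== PRECONDITION & SPEC =====
def Spec_map_word_to_token (char_start : Option Int) (offset_mapping : List (Int × Int)) (out : Option Int) : Prop := out = map_word_to_token_alt char_start offset_mapping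
instance (char_start : Option Int) (offset_mapping : List (Int × Int)) (out : Option Int) : Decidable (Spec_map_word_to_token char_start offset_mapping out) := by unfold Spec_map_word_to_token; infer_instance

-- ===== CLAIM (what is proved, stated in full; the proofs are below) =====
def Claim_equal_map_word_to_token : Prop := ∀ (char_start : Option Int) (offset_mapping : List (Int × Int)), Dom_map_word_to_token char_start offset_mapping → Spec_map_word_to_token char_start offset_mapping (map_word_to_token char_start offset_mapping)

-- ===== LEMMAS AND PROOFS =====

-- the step of Python's min as it appears after pulling the fold over range(len) back onto the enumerated list
def minStep (om : List (Int × Int)) (c : Int) (acc : Option Int) (p : Int × (Int × Int)) : Option Int :=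
  match acc with
  | none => some p.1
  | some m =>
    if |(PySem.List.pyGetD om p.1 ((0 : Int), (0 : Int))).1 - c| <
       |(PySem.List.pyGetD om m ((0 : Int), (0 : Int))).1 - c| then some p.1 else some m

-- core invariant: A's two passes (containment scan, then argmin fold) equal B's fused loop
lemma loop_eq (om : List (Int × Int)) (c : Int) :
    ∀ (l : List (Int × (Int × Int))) (bI bD : Int),
    (∀ p ∈ l, |(PySem.List.pyGetD om p.1 ((0 : Int), (0 : Int))).1 - c| = |p.2.1 - c|) →
    |(PySem.List.pyGetD om bI ((0 : Int), (0 : Int))).1 - c| = bD →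
    (match findTokA c l with
     | some i => some i
     | none => l.foldl (minStep om c) (some bI)) = some (altLoop c bI bD l) := by
  intro l
  induction l with
  | nil => intro bI bD _ _; simp [findTokA, altLoop]
  | cons p rest ih =>
    intro bI bD hmem hacc
    obtain ⟨i, s, e⟩ := p
    have hhead : |(PySem.List.pyGetD om i ((0 : Int), (0 : Int))).1 - c| = |s - c| :=
      hmem (i, (s, e)) (List.mem_cons_self)
    have hmem' : ∀ p ∈ rest, |(PySem.List.pyGetD om p.1 ((0 : Int), (0 : Int))).1 - c| = |p.2.1 - c| :=
      fun p hp => hmem p (List.mem_cons_of_mem _ hp)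
    by_cases hc : s ≤ c ∧ c < e
    · simp [findTokA, altLoop, hc]
    · have hstep : minStep om c (some bI) (i, (s, e)) =
          if |s - c| < bD then some i else some bI := by
        simp [minStep, hhead, hacc]
      rw [findTokA, altLoop]
      simp only [hc, if_false, List.foldl_cons, hstep]
      by_cases hd : |s - c| < bD
      · simpa [hd] using ih i (|s - c|) hmem' hhead
      · simpa [hd] using ih bI bD hmem' hacc

-- ===== VERDICT (by name: the statement is the Claim_ definition above) =====
theorem map_word_to_token_spec : Claim_equal_map_word_to_token := by
  intro char_start offset_mapping _
  unfold Spec_map_word_to_token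
  cases char_start with
  | none => simp [map_word_to_token, map_word_to_token_alt]
  | some c =>
    cases offset_mapping with
    | nil => simp [map_word_to_token, map_word_to_token_alt]
    | cons hd tl =>
      obtain ⟨s0, e0⟩ := hd
      -- rewrite A's min-over-range fold as a fold over the enumerated list
      have hrange : PySem.List.pyRange 0 ((((s0, e0) :: tl).length : Nat) : Int) 1 =
          (PySem.List.enumerate ((s0, e0) :: tl) 0).map (·.1) := by
        rw [PySem.List.map_fst_enumerate]; norm_num
      have hA : map_word_to_token (some c) ((s0, e0) :: tl) =
          (match findTokA c (PySem.List.enumerate ((s0, e0) :: tl) 0) with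
           | some i => some i
           | none => (PySem.List.enumerate ((s0, e0) :: tl) 0).foldl
               (minStep ((s0, e0) :: tl) c) none) := by
        simp only [map_word_to_token, List.isEmpty_cons, Bool.false_eq_true, if_false,
          PySem.List.min?, hrange, List.foldl_map]
        cases findTokA c (PySem.List.enumerate ((s0, e0) :: tl) 0) with
        | none => exact List.foldl_ext _ _ none (fun a b _ => by cases a <;> rfl)
        | some i => rfl
      -- the membership hypothesis of loop_eq
      have hmem : ∀ p ∈ PySem.List.enumerate ((s0, e0) :: tl) 0,
          |(PySem.List.pyGetD ((s0, e0) :: tl) p.1 ((0 : Int), (0 : Int))).1 - c| = |p.2.1 - c| := by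
        intro p hp
        rw [PySem.List.mem_enumerate_iff] at hp
        obtain ⟨k, hk, rfl⟩ := hp
        simp [PySem.List.pyGetD_natCast, List.getD_eq_getElem?_getD,
          List.getElem?_eq_getElem hk]
      have hacc : |(PySem.List.pyGetD ((s0, e0) :: tl) (0 : Int) ((0 : Int), (0 : Int))).1 - c|
          = |s0 - c| := by
        simp [PySem.List.pyGetD_zero_cons]
      -- first fold step: from accumulator none to accumulator (some 0)
      have hfold : (PySem.List.enumerate ((s0, e0) :: tl) 0).foldl
            (minStep ((s0, e0) :: tl) c) none =
          (PySem.List.enumerate ((s0, e0) :: tl) 0).foldl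
            (minStep ((s0, e0) :: tl) c) (some 0) := by
        simp [PySem.List.enumerate_cons, List.foldl_cons, minStep]
      rw [hA, hfold]
      rw [loop_eq ((s0, e0) :: tl) c (PySem.List.enumerate ((s0, e0) :: tl) 0) 0 (|s0 - c|)
        hmem hacc]
      simp [map_word_to_token_alt]
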